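-- pv_equiv track=rewrite | github.com/boonyadol-ksl/it-automated-system | ksl_itops/analysis/engine.py | _check_software
-- ===== SOURCE A (Python) =====
-- from typing import Any, Dict, List, Optional
--
-- def _check_software(installed: List[str], policy: Dict[str, Any]) -> List[Dict[str, Any]]:
--     issues = []
--     installed_lower = {s.lower() for s in installed}
--
--     for req in policy.get("required") or []:
--         if not any(req.lower() in s for s in installed_lower):
--             issues.append({
--                 "type": "software",
--                 "scope": "device_issue",
--                 "severity": "high",
--                 "description": f"Required software not installed: {req}",
--                 "root_cause": "Software missing from installed list",
--                 "recommendation": f"Install {req} immediately via software deployment tool",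
--             })
--
--     for forbidden in policy.get("forbidden") or []:
--         if any(forbidden.lower() in s for s in installed_lower):
--             issues.append({
--                 "type": "software",
--                 "scope": "device_issue",
--                 "severity": "critical",
--                 "description": f"Forbidden software detected: {forbidden}",
--                 "root_cause": "Unauthorized software installed on machine",
--                 "recommendation": f"Uninstall {forbidden} immediately and audit user activity",
--             })
--
--     return issues
-- ===== SOURCE B (Python) =====
-- from typing import Any, Dict, List
--
-- def _check_software(installed: List[str], policy: Dict[str, Any]) -> List[Dict[str, Any]]:
--     required = policy.get("required") or []
--     forbidden = policy.get("forbidden") or []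
--     pats = [p.lower() for p in required + forbidden]
--     hit = set()
--     for s in installed:
--         sl = s.lower()
--         for p in pats:
--             if p in sl:
--                 hit.add(p)
--     issues = []
--     for req in required:
--         if req.lower() not in hit:
--             issues.append({
--                 "type": "software",
--                 "scope": "device_issue",
--                 "severity": "high",
--                 "description": f"Required software not installed: {req}",
--                 "root_cause": "Software missing from installed list",
--                 "recommendation": f"Install {req} immediately via software deployment tool",
--             })
--     for forbidden_item in forbidden:
--         if forbidden_item.lower() in hit:
--             issues.append({
--                 "type": "software",
--                 "scope": "device_issue",
--                 "severity": "critical",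
--                 "description": f"Forbidden software detected: {forbidden_item}",
--                 "root_cause": "Unauthorized software installed on machine",
--                 "recommendation": f"Uninstall {forbidden_item} immediately and audit user activity",
--             })
--     return issues
-- ===== Notes on version B (the rewrite author's own statement) =====
-- stated objective: alternative
-- what changed: Instead of scanning the lowered-installed set once per pattern, B pre-lowers all patterns once and makes a single pass over the installed strings (each lowered once) recording which patterns occur in a matched-set, then emits issues by set membership.
import Mathlib
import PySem

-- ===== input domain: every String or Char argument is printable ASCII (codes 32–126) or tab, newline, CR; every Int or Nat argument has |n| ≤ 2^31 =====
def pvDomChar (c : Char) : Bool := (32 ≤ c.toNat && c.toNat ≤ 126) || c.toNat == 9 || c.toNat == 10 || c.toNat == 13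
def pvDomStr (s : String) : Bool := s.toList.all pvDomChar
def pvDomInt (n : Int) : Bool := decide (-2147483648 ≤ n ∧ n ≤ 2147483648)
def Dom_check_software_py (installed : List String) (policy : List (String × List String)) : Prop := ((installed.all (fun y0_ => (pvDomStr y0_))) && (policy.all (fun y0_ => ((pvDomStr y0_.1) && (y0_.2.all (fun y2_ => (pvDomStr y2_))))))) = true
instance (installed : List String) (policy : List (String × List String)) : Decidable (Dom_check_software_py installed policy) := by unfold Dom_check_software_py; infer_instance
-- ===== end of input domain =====

-- B replaces A's per-pattern scans over the installed set by a single pass over the installed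
-- list that lowers each string once and records which (pre-lowered) patterns it contains
-- (objective: alternative traversal; each pattern and installed string is lowered only once).

-- ===== PORT A =====
-- the two issue-record literals are identical in both Pythons; ported once, used by both ports
def pvReqIssue (req : String) : List (String × String) :=
  [("type", "software"), ("scope", "device_issue"), ("severity", "high"),
   ("description", "Required software not installed: " ++ req),
   ("root_cause", "Software missing from installed list"),
   ("recommendation", "Install " ++ req ++ " immediately via software deployment tool")]

def pvForbIssue (f : String) : List (String × String) :=
  [("type", "software"), ("scope", "device_issue"), ("severity", "critical"),
   ("description", "Forbidden software detected: " ++ f),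
   ("root_cause", "Unauthorized software installed on machine"),
   ("recommendation", "Uninstall " ++ f ++ " immediately and audit user activity")]

def check_software_py (installed : List String) (policy : List (String × List String)) : List (List (String × String)) :=
  let installed_lower : PySem.Set String := PySem.Set.ofList (installed.map PySem.Str.lower)
  let issues := ((PySem.Dict.mk policy).getD "required" []).foldl
    (fun issues req =>
      if !(installed_lower.any (fun s => PySem.Str.isIn (PySem.Str.lower req) s))
      then issues ++ [pvReqIssue req] else issues) []
  ((PySem.Dict.mk policy).getD "forbidden" []).foldl
    (fun issues forbidden =>
      if installed_lower.any (fun s => PySem.Str.isIn (PySem.Str.lower forbidden) s)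
      then issues ++ [pvForbIssue forbidden] else issues) issues

-- ===== PORT B =====
def check_software_py_alt (installed : List String) (policy : List (String × List String)) : List (List (String × String)) :=
  let required := (PySem.Dict.mk policy).getD "required" []
  let forbidden := (PySem.Dict.mk policy).getD "forbidden" []
  let pats := (required ++ forbidden).map PySem.Str.lower
  let hit : PySem.Set String := installed.foldl
    (fun hit s =>
      let sl := PySem.Str.lower s
      pats.foldl (fun hit p => if PySem.Str.isIn p sl then PySem.Set.add hit p else hit) hit)
    PySem.Set.empty
  let issues := required.foldl
    (fun issues req =>
      if !(PySem.Set.contains hit (PySem.Str.lower req))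
      then issues ++ [pvReqIssue req] else issues) []
  forbidden.foldl
    (fun issues f =>
      if PySem.Set.contains hit (PySem.Str.lower f)
      then issues ++ [pvForbIssue f] else issues) issues

-- ===== PRECONDITION & SPEC =====
def Spec_check_software_py (installed : List String) (policy : List (String × List String)) (out : List (List (String × String))) : Prop := out = check_software_py_alt installed policy
instance (installed : List String) (policy : List (String × List String)) (out : List (List (String × String))) : Decidable (Spec_check_software_py installed policy out) := by unfold Spec_check_software_py; infer_instance

-- ===== CLAIM (what is proved, stated in full; the proofs are below) =====
def Claim_equal_check_software_py : Prop := ∀ (installed : List String) (policy : List (String × List String)), Dom_check_software_py installed policy → Spec_check_software_py installed policy (check_software_py installed policy)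

-- ===== LEMMAS AND PROOFS =====

-- membership in B's inner loop over the patterns of one installed string
theorem pv_mem_inner (pats : List String) (h : PySem.Set String) (sl : String) (q : String) :
    q ∈ pats.foldl (fun hit p => if PySem.Str.isIn p sl then PySem.Set.add hit p else hit) h ↔
      q ∈ h ∨ (q ∈ pats ∧ PySem.Str.isIn q sl = true) := by
  induction pats generalizing h with
  | nil => simp
  | cons p rest ih =>
    simp only [List.foldl_cons, ih, List.mem_cons]
    split
    · next hp =>
      rw [PySem.Set.mem_add]
      constructor
      · rintro ((hq | rfl) | hq)
        · exact Or.inl hq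
        · exact Or.inr ⟨Or.inl rfl, hp⟩
        · exact Or.inr ⟨Or.inr hq.1, hq.2⟩
      · rintro (hq | ⟨(rfl | hq), hin⟩)
        · exact Or.inl (Or.inl hq)
        · exact Or.inl (Or.inr rfl)
        · exact Or.inr ⟨hq, hin⟩
    · next hp =>
      constructor
      · rintro (hq | hq)
        · exact Or.inl hq
        · exact Or.inr ⟨Or.inr hq.1, hq.2⟩
      · rintro (hq | ⟨(rfl | hq), hin⟩)
        · exact Or.inl hq
        · exact absurd hin hp
        · exact Or.inr ⟨hq, hin⟩

-- membership in B's outer loop over the installed strings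
theorem pv_mem_outer (installed : List String) (pats : List String) (h : PySem.Set String) (q : String) :
    q ∈ installed.foldl
        (fun hit s =>
          pats.foldl (fun hit p => if PySem.Str.isIn p (PySem.Str.lower s) then PySem.Set.add hit p else hit) hit) h ↔
      q ∈ h ∨ (q ∈ pats ∧ ∃ s ∈ installed, PySem.Str.isIn q (PySem.Str.lower s) = true) := by
  induction installed generalizing h with
  | nil => simp
  | cons s rest ih =>
    simp only [List.foldl_cons, ih, pv_mem_inner, List.mem_cons]
    constructor
    · rintro ((hq | ⟨hp, hin⟩) | ⟨hp, t, ht, hin⟩)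
      · exact Or.inl hq
      · exact Or.inr ⟨hp, s, Or.inl rfl, hin⟩
      · exact Or.inr ⟨hp, t, Or.inr ht, hin⟩
    · rintro (hq | ⟨hp, t, (rfl | ht), hin⟩)
      · exact Or.inl (Or.inl hq)
      · exact Or.inl (Or.inr ⟨hp, hin⟩)
      · exact Or.inr ⟨hp, t, ht, hin⟩

-- A's membership test over the lowered set equals the existential over the installed list
theorem pv_any_ofList (installed : List String) (q : String) :
    (PySem.Set.ofList (installed.map PySem.Str.lower) : List String).any (fun s => PySem.Str.isIn q s) = true ↔
      ∃ s ∈ installed, PySem.Str.isIn q (PySem.Str.lower s) = true := by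
  rw [List.any_eq_true]
  constructor
  · rintro ⟨x, hx, hin⟩
    rw [PySem.Set.mem_ofList] at hx
    obtain ⟨s, hs, rfl⟩ := List.mem_map.mp hx
    exact ⟨s, hs, hin⟩
  · rintro ⟨s, hs, hin⟩
    refine ⟨PySem.Str.lower s, ?_, hin⟩
    rw [PySem.Set.mem_ofList]
    exact List.mem_map.mpr ⟨s, hs, rfl⟩

-- the two boolean tests agree on every pattern that occurs (lowered) in pats
theorem pv_contains_eq_any (installed : List String) (pats : List String) (q : String) (hq : q ∈ pats) :
    PySem.Set.contains
      (installed.foldl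
        (fun hit s =>
          pats.foldl (fun hit p => if PySem.Str.isIn p (PySem.Str.lower s) then PySem.Set.add hit p else hit) hit)
        PySem.Set.empty) q =
    (PySem.Set.ofList (installed.map PySem.Str.lower) : List String).any (fun s => PySem.Str.isIn q s) := by
  rw [Bool.eq_iff_iff, PySem.Set.contains_iff, pv_mem_outer, pv_any_ofList]
  simp only [PySem.Set.empty]
  simp only [List.not_mem_nil, false_or]
  exact ⟨fun h => h.2, fun h => ⟨hq, h⟩⟩

theorem check_software_py_eq (installed : List String) (policy : List (String × List String)) :
    check_software_py installed policy = check_software_py_alt installed policy := by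
  unfold check_software_py check_software_py_alt
  simp only []
  set required := (PySem.Dict.mk policy).getD "required" [] with hreq
  set forbidden := (PySem.Dict.mk policy).getD "forbidden" [] with hforb
  have hcond : ∀ q ∈ (required ++ forbidden).map PySem.Str.lower,
      PySem.Set.contains
        (installed.foldl
          (fun hit s =>
            ((required ++ forbidden).map PySem.Str.lower).foldl
              (fun hit p => if PySem.Str.isIn p (PySem.Str.lower s) then PySem.Set.add hit p else hit) hit)
          PySem.Set.empty) q =
      (PySem.Set.ofList (installed.map PySem.Str.lower) : List String).any (fun s => PySem.Str.isIn q s) :=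
    fun q hq => pv_contains_eq_any installed _ q hq
  have hfold1 : required.foldl
      (fun issues req =>
        if !((PySem.Set.ofList (installed.map PySem.Str.lower) : List String).any (fun s => PySem.Str.isIn (PySem.Str.lower req) s))
        then issues ++ [pvReqIssue req] else issues) ([] : List (List (String × String))) =
    required.foldl
      (fun issues req =>
        if !(PySem.Set.contains
              (installed.foldl
                (fun hit s =>
                  ((required ++ forbidden).map PySem.Str.lower).foldl
                    (fun hit p => if PySem.Str.isIn p (PySem.Str.lower s) then PySem.Set.add hit p else hit) hit)
                PySem.Set.empty) (PySem.Str.lower req))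
        then issues ++ [pvReqIssue req] else issues) [] := by
    apply PySem.List.foldl_congr_mem
    intro acc req hmem
    rw [hcond (PySem.Str.lower req)
        (List.mem_map.mpr ⟨req, List.mem_append.mpr (Or.inl hmem), rfl⟩)]
  rw [hfold1]
  apply PySem.List.foldl_congr_mem
  intro acc f hmem
  rw [hcond (PySem.Str.lower f)
      (List.mem_map.mpr ⟨f, List.mem_append.mpr (Or.inr hmem), rfl⟩)]

-- ===== VERDICT (by name: the statement is the Claim_ definition above) =====
theorem check_software_py_spec : Claim_equal_check_software_py := by
  intro installed policy _
  unfold Spec_check_software_py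
  exact check_software_py_eq installed policy
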